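-- pv_equiv track=rewrite | github.com/luccondevaux-cpu/LOBF-Calculator | stats.py | tri_diag_stats
-- ===== SOURCE A (Python) =====
-- def tri_diag_stats(list):
--     triangle = [list]
--     triangle_len_end = len(list)
--     all_zeros = False
--     while triangle_len_end > 1 and not all_zeros:
--         all_zeros = True
--         to_add = triangle[-1]
--         add = []
--         for i in range(len(to_add)-1):
--             add_num = to_add[i+1] - to_add[i]
--             add.append(add_num)
--             if add_num != 0:
--                 all_zeros = False
--         if not all_zeros:
--             triangle.append(add)
--             triangle_len_end = len(add)
--
--     diag = []
--     for i in triangle: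
--         diag.append(i[0])
--     return triangle, diag
-- ===== SOURCE B (Python) =====
-- def tri_diag_stats(list):
--     def build(row):
--         if len(row) <= 1:
--             return [row]
--         diffs = [b - a for a, b in zip(row, row[1:])]
--         if all(d == 0 for d in diffs):
--             return [row]
--         return [row] + build(diffs)
--     triangle = build(list)
--     return triangle, [r[0] for r in triangle]
-- ===== Notes on version B (the rewrite author's own statement) =====
-- stated objective: simpler
-- what changed: Replaces A's imperative while-loop that mutates a triangle list, re-reads its last row and threads an all_zeros flag through an index-based inner loop with a direct recursion build(row) over successive difference rows computed by zip(row, row[1:]).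
import Mathlib
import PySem

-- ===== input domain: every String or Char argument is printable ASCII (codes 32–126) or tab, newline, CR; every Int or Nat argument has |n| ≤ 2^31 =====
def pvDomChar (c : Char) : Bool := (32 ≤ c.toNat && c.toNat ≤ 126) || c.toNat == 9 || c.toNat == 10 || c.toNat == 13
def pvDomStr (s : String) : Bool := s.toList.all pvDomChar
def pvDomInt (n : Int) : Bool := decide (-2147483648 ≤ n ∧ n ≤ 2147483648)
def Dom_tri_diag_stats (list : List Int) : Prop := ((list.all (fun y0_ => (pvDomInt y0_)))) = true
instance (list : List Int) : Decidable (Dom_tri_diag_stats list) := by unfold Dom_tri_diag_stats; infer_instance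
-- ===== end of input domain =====

-- B replaces A's while-loop with flag threading by a direct recursion over successive
-- difference rows (objective: simpler); return-value equivalence on nonempty lists.

-- ===== PORT B helper (defined first: it also states PORT A's termination measure) =====
-- diffs = [b - a for a, b in zip(row, row[1:])]
def pvDiffs (row : List Int) : List Int := (row.zip row.tail).map (fun p => p.2 - p.1)

theorem pvDiffs_length (row : List Int) : (pvDiffs row).length = row.length - 1 := by
  simp [pvDiffs]

-- ===== PORT A =====
-- inner for-loop of A: builds `add` and the `all_zeros` flag over range(len(to_add)-1)
def pvStepA (toAdd : List Int) : List Int × Bool :=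
  (PySem.List.pyRange 0 ((toAdd.length : Int) - 1) 1).foldl
    (fun s i =>
      let addNum := PySem.List.pyGetD toAdd (i + 1) 0 - PySem.List.pyGetD toAdd i 0
      (s.1 ++ [addNum], if addNum ≠ 0 then false else s.2))
    ([], true)

-- general shape of the inner fold (cited by pvStepA_eq)
theorem pvFoldA (f : Int → Int) (idxs : List Int) (acc : List Int) (b : Bool) :
    idxs.foldl (fun s i =>
        let addNum := f i
        (s.1 ++ [addNum], if addNum ≠ 0 then false else s.2)) (acc, b)
      = (acc ++ idxs.map f, b && (idxs.map f).all (· == 0)) := by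
  induction idxs generalizing acc b with
  | nil => simp
  | cons x xs ih =>
      simp only [List.foldl_cons, List.map_cons, List.all_cons, ih]
      by_cases hx : f x = 0 <;> simp [hx]

-- the index-based difference comprehension is pvDiffs (cited by pvStepA_eq)
theorem pvRangeDiffs : ∀ l : List Int,
    (List.range (l.length - 1)).map (fun k => l.getD (k+1) 0 - l.getD k 0) = pvDiffs l
  | [] => by simp [pvDiffs]
  | [a] => by simp [pvDiffs]
  | a :: b :: t => by
      have ih := pvRangeDiffs (b :: t)
      simp only [pvDiffs, List.tail_cons] at ih ⊢
      simp only [List.length_cons, Nat.add_sub_cancel, List.range_succ_eq_map,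
        List.map_cons, List.map_map, List.zip_cons_cons]
      refine congrArg₂ _ (by simp) ?_
      rw [← ih]
      exact List.map_congr_left fun k _ => by simp [Function.comp]
termination_by l => l.length

theorem pvMapDiffs (l : List Int) :
    (PySem.List.pyRange 0 ((l.length : Int) - 1) 1).map
      (fun i => PySem.List.pyGetD l (i + 1) 0 - PySem.List.pyGetD l i 0) = pvDiffs l := by
  cases l with
  | nil => rfl
  | cons a t =>
      have h1 : ((a :: t).length : Int) - 1 = (((a :: t).length - 1 : Nat) : Int) := by simp
      rw [h1, PySem.List.pyRange_zero_natCast, List.map_map, ← pvRangeDiffs (a :: t)]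
      refine List.map_congr_left fun k _ => ?_
      show PySem.List.pyGetD (a :: t) ((k : Int) + 1) 0 - PySem.List.pyGetD (a :: t) (k : Int) 0 = _
      have h2 : ((k : Int) + 1) = ((k + 1 : Nat) : Int) := by push_cast; ring
      rw [h2, PySem.List.pyGetD_natCast, PySem.List.pyGetD_natCast]

-- characterisation of the inner loop (also gives pvLoopA's termination)
theorem pvStepA_eq (toAdd : List Int) :
    pvStepA toAdd = (pvDiffs toAdd, (pvDiffs toAdd).all (· == 0)) := by
  have h := pvFoldA (fun i => PySem.List.pyGetD toAdd (i + 1) 0 - PySem.List.pyGetD toAdd i 0)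
      (PySem.List.pyRange 0 ((toAdd.length : Int) - 1) 1) [] true
  simp only [List.nil_append, Bool.true_and, pvMapDiffs] at h
  exact h

-- A's while-loop; state = (triangle, the current last row)
def pvLoopA (triangle : List (List Int)) (toAdd : List Int) : List (List Int) :=
  if _h : 1 < toAdd.length then
    let s := pvStepA toAdd
    if s.2 then triangle
    else pvLoopA (triangle ++ [s.1]) s.1
  else triangle
termination_by toAdd.length
decreasing_by
  simp only [pvStepA_eq] at *
  have := pvDiffs_length toAdd
  simp_all
  omega

-- i[0] is ported as pyGetD r 0 0; exact because Pre_ makes every row nonempty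
def tri_diag_stats (list : List Int) : List (List Int) × List Int :=
  let triangle := pvLoopA [list] list
  (triangle, triangle.foldl (fun d r => d ++ [PySem.List.pyGetD r 0 0]) [])

-- ===== PORT B =====
def pvBuildB (row : List Int) : List (List Int) :=
  if _h : row.length ≤ 1 then [row]
  else
    let diffs := pvDiffs row
    if diffs.all (· == 0) then [row]
    else row :: pvBuildB diffs
termination_by row.length
decreasing_by
  have := pvDiffs_length row
  omega

def tri_diag_stats_alt (list : List Int) : List (List Int) × List Int :=
  let triangle := pvBuildB list
  (triangle, triangle.map (fun r => PySem.List.pyGetD r 0 0))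

-- ===== PRECONDITION & SPEC =====
-- Pre_ excludes only the empty list, on which Python A raises IndexError (i[0] on the empty row)
def Pre_tri_diag_stats (list : List Int) : Prop := list ≠ []
instance (list : List Int) : Decidable (Pre_tri_diag_stats list) := by
  unfold Pre_tri_diag_stats; infer_instance

def pvWitness_tri_diag_stats : List Int := ([1, 2, 4] : List Int)

def Spec_tri_diag_stats (list : List Int) (out : List (List Int) × List Int) : Prop := out = tri_diag_stats_alt list
instance (list : List Int) (out : List (List Int) × List Int) : Decidable (Spec_tri_diag_stats list out) := by unfold Spec_tri_diag_stats; infer_instance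

-- ===== CLAIM (what is proved, stated in full; the proofs are below) =====
def Claim_equal_tri_diag_stats : Prop := ∀ (list : List Int), Dom_tri_diag_stats list → Pre_tri_diag_stats list → Spec_tri_diag_stats list (tri_diag_stats list)

-- ===== LEMMAS AND PROOFS =====

theorem pvBuildB_cons (row : List Int) :
    pvBuildB row = row :: (pvBuildB row).tail := by
  by_cases h : row.length ≤ 1
  · simp [pvBuildB, h]
  · rw [pvBuildB]
    simp only [dif_neg h]
    split <;> simp

theorem pvLoopA_eq (n : Nat) : ∀ toAdd : List Int, toAdd.length ≤ n →
    ∀ triangle, pvLoopA triangle toAdd = triangle ++ (pvBuildB toAdd).tail := by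
  induction n with
  | zero =>
      intro toAdd h triangle
      have h1 : ¬ 1 < toAdd.length := by omega
      have h0 : toAdd.length ≤ 1 := by omega
      rw [pvLoopA, pvBuildB]
      simp [h1, h0]
  | succ n ih =>
      intro toAdd h triangle
      rw [pvLoopA]
      by_cases h1 : 1 < toAdd.length
      · have hle : ¬ toAdd.length ≤ 1 := by omega
        simp only [h1, dif_pos, pvStepA_eq]
        by_cases h2 : ((pvDiffs toAdd).all (· == 0)) = true
        · rw [pvBuildB]
          simp [h2, hle]
        · simp only [if_neg h2]
          rw [ih (pvDiffs toAdd) (by have := pvDiffs_length toAdd; omega)]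
          conv_rhs => rw [pvBuildB]
          simp only [dif_neg hle, if_neg h2, List.tail_cons]
          rw [pvBuildB_cons (pvDiffs toAdd)]
          simp
      · have h0 : toAdd.length ≤ 1 := by omega
        rw [pvBuildB]
        simp [h1, h0]

theorem pvTriangles_eq (list : List Int) : pvLoopA [list] list = pvBuildB list := by
  rw [pvLoopA_eq list.length list le_rfl]
  rw [pvBuildB_cons list]
  simp

-- ===== VERDICT (by name: the statement is the Claim_ definition above) =====
theorem tri_diag_stats_spec : Claim_equal_tri_diag_stats := by
  intro list _ _
  unfold Spec_tri_diag_stats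
  simp only [tri_diag_stats, tri_diag_stats_alt, pvTriangles_eq,
    PySem.List.foldl_append_singleton_eq_map, List.nil_append]
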